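-- pv_equiv track=rewrite | github.com/Fondamenti18/fondamenti-di-programmazione | students/1404378/homework02/program03.py | filtro
-- ===== SOURCE A (Python) =====
-- def associa(insieme1, insieme2):
--     return {k: v for k, v in zip(insieme1, insieme2)}
--
-- def remove_duplicates(stringa):
--     seen = set()
--     ret = ""
--     for ch in stringa:
--         if ch not in seen:
--             ret += ch
--             seen.add(ch)
--     return ret
--
-- def filtro(parola, codice):
--     struttura = remove_duplicates(codice)
--     unici = remove_duplicates(parola)
--     if len(unici) != len(struttura):
--         return False
--     mapping = associa(struttura, unici)
--     match = ""
--     for char in codice: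
--         match += mapping.get(char, "")
--     return match == parola
-- ===== SOURCE B (Python) =====
-- def filtro(parola, codice):
--     if len(parola) != len(codice):
--         return False
--     return all(codice.index(c) == parola.index(p) for c, p in zip(codice, parola))
-- ===== Notes on version B (the rewrite author's own statement) =====
-- stated objective: idiomatic
-- what changed: Replaces A's three passes (two dedup scans building distinct-character strings, a zip-built dict, and a rebuild-and-compare pass with string concatenation) by the standard one-liner isomorphic-string fingerprint check: lengths equal and, for every aligned pair, the first-occurrence index of the code char in codice equals that of the word char in parola.
import Mathlib
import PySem

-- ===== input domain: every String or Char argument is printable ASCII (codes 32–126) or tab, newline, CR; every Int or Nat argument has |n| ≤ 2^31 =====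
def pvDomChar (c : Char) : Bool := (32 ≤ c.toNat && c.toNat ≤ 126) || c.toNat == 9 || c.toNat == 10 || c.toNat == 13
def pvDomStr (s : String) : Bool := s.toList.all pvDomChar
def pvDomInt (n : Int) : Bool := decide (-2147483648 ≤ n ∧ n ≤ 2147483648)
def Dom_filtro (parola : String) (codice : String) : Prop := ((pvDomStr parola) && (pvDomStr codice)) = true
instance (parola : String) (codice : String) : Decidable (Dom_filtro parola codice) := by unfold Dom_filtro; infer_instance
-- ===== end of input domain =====

-- B replaces A's three passes (two dedups + zip-dict + rebuild-and-compare) by the standard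
-- first-occurrence-fingerprint check for isomorphic strings (idiomatic; not claimed faster).

-- ===== PORT A =====
-- remove_duplicates: fold keeping (seen set, accumulated string)
def removeDuplicates (stringa : List Char) : List Char :=
  (stringa.foldl
    (fun (st : PySem.Set Char × List Char) ch =>
      if PySem.Set.contains st.1 ch then st else (PySem.Set.add st.1 ch, st.2 ++ [ch]))
    (PySem.Set.empty, [])).2

-- associa: {k: v for k, v in zip(insieme1, insieme2)}
def associa (insieme1 insieme2 : List Char) : PySem.Dict Char Char :=
  (insieme1.zip insieme2).foldl (fun d kv => d.insert kv.1 kv.2) PySem.Dict.empty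

def filtro (parola : String) (codice : String) : Bool :=
  let struttura := removeDuplicates codice.toList
  let unici := removeDuplicates parola.toList
  if unici.length ≠ struttura.length then false
  else
    let mapping := associa struttura unici
    -- match += mapping.get(char, "") : a found char appends itself, a miss appends nothing
    let mtch := codice.toList.foldl
      (fun acc ch => acc ++ (match mapping.get? ch with | some v => [v] | none => [])) []
    decide (mtch = parola.toList)

-- ===== PORT B =====
def filtro_alt (parola : String) (codice : String) : Bool :=
  if parola.toList.length ≠ codice.toList.length then false
  else (codice.toList.zip parola.toList).all
    (fun q => PySem.List.index? codice.toList q.1 == PySem.List.index? parola.toList q.2)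

-- ===== PRECONDITION & SPEC =====
def Spec_filtro (parola : String) (codice : String) (out : Bool) : Prop := out = filtro_alt parola codice
instance (parola : String) (codice : String) (out : Bool) : Decidable (Spec_filtro parola codice out) := by unfold Spec_filtro; infer_instance

-- ===== CLAIM (what is proved, stated in full; the proofs are below) =====
def Claim_equal_filtro : Prop := ∀ (parola : String) (codice : String), Dom_filtro parola codice → Spec_filtro parola codice (filtro parola codice)

-- ===== LEMMAS AND PROOFS =====

-- the per-character value A's rebuild loop appends (proof-side helper)
def rankMap (sc sp : List Char) (ch : Char) : Char :=
  (((PySem.List.index? sc ch).bind fun k => sp[k]?)).getD 'A'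

theorem rd_aux (s : List Char) : ∀ (a : List Char),
    s.foldl (fun (st : PySem.Set Char × List Char) ch =>
      if PySem.Set.contains st.1 ch then st else (PySem.Set.add st.1 ch, st.2 ++ [ch])) (a, a)
      = (s.foldl PySem.Set.add a, s.foldl PySem.Set.add a) := by
  induction s with
  | nil => intro a; rfl
  | cons x s ih =>
    intro a
    by_cases h : PySem.Set.contains a x = true
    · simp only [List.foldl_cons, h, if_true]
      rw [show PySem.Set.add a x = a by simp [PySem.Set.add]; simpa [PySem.Set.contains] using h]
      exact ih a
    · simp only [List.foldl_cons, h, Bool.false_eq_true, if_false]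
      rw [show PySem.Set.add a x = a ++ [x] by simp [PySem.Set.add]; simpa [PySem.Set.contains] using h]
      exact ih (a ++ [x])

theorem removeDuplicates_eq_dedup (s : List Char) :
    removeDuplicates s = PySem.List.dedup s := by
  simp only [removeDuplicates, PySem.List.dedup_eq_ofList, PySem.Set.ofList_eq_foldl]
  have := rd_aux s ([] : List Char)
  simp only [PySem.Set.empty] at *
  rw [this]

theorem foldl_add_ext (t : List Char) : ∀ (s : List Char), ∃ u, t.foldl PySem.Set.add s = s ++ u := by
  induction t with
  | nil => intro s; exact ⟨[], by simp⟩
  | cons x t ih =>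
    intro s
    obtain ⟨u, hu⟩ := ih (PySem.Set.add s x)
    by_cases h : x ∈ s
    · exact ⟨u, by rw [List.foldl_cons, hu, show PySem.Set.add s x = s by simp [PySem.Set.add]; simpa [PySem.Set.contains] using h]⟩
    · refine ⟨x :: u, ?_⟩
      rw [List.foldl_cons, hu, show PySem.Set.add s x = s ++ [x] by simp [PySem.Set.add]; simpa [PySem.Set.contains] using h]
      simp

theorem dedup_append (l t : List Char) :
    ∃ u, PySem.List.dedup (l ++ t) = PySem.List.dedup l ++ u := by
  simp only [PySem.List.dedup_eq_ofList, PySem.Set.ofList_eq_foldl, List.foldl_append]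
  exact foldl_add_ext t _

theorem dedup_append_singleton (l : List Char) (a : Char) :
    PySem.List.dedup (l ++ [a]) =
      if a ∈ l then PySem.List.dedup l else PySem.List.dedup l ++ [a] := by
  simp only [PySem.List.dedup_eq_ofList, PySem.Set.ofList_eq_foldl, List.foldl_append,
    List.foldl_cons, List.foldl_nil]
  rw [← PySem.Set.ofList_eq_foldl]
  by_cases h : a ∈ l
  · simp only [h, if_true]
    simp [PySem.Set.add]
    exact h
  · simp only [h, if_false]
    simp [PySem.Set.add]
    intro hc
    exact absurd hc h

theorem index?_eq_some_iff_getElem (l : List Char) (x : Char) (k : Nat) :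
    PySem.List.index? l x = some k ↔
      ∃ h : k < l.length, l[k] = x ∧ ∀ j (_ : j < k), l[j]? ≠ some x := by
  constructor
  · intro h
    obtain ⟨hk, hx, hmin⟩ := PySem.List.getElem_of_index?_eq_some h
    refine ⟨hk, hx, fun j hj he => ?_⟩
    rw [List.getElem?_eq_getElem (by omega)] at he
    exact hmin j hj (Option.some.inj he)
  · rintro ⟨hk, hx, hmin⟩
    rw [PySem.List.index?_eq_some_iff]
    refine ⟨l.take k, l.drop (k + 1), ?_, by rw [List.length_take]; omega, ?_⟩
    · conv_lhs => rw [← List.take_append_drop k l]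
      rw [← List.getElem_cons_drop hk, hx]
    · intro hmem
      obtain ⟨i, hi, hgi⟩ := List.mem_iff_getElem.mp hmem
      have hilen : i < k := by
        have := List.length_take (l := l) (i := k); omega
      refine hmin i hilen ?_
      rw [List.getElem?_eq_getElem (by omega), ← hgi, List.getElem_take]

theorem mem_take_iff_index?_lt (s : List Char) (x : Char) (m : Nat) :
    x ∈ s.take m ↔ ∃ j, PySem.List.index? s x = some j ∧ j < m := by
  constructor
  · intro hmem
    have hx : x ∈ s := List.mem_of_mem_take hmem
    obtain ⟨j, hj⟩ := Option.isSome_iff_exists.mp ((PySem.List.index?_isSome_iff s x).mpr hx)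
    obtain ⟨hk, hgx, hmin⟩ := PySem.List.getElem_of_index?_eq_some hj
    refine ⟨j, hj, ?_⟩
    obtain ⟨i, hi, hgi⟩ := List.mem_iff_getElem.mp hmem
    have him : i < m := by
      have := List.length_take (l := s) (i := m); omega
    by_contra hge
    have hij : i < j := by omega
    have : s[i]'(by have := List.length_take (l := s) (i := m); omega) = x := by
      rw [← hgi, List.getElem_take]
    exact hmin i hij this
  · rintro ⟨j, hj, hjm⟩
    obtain ⟨hk, hgx, hmin⟩ := PySem.List.getElem_of_index?_eq_some hj
    rw [← hgx]
    have : (s.take m)[j]'(by simp; omega) = s[j] := List.getElem_take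
    rw [← this]
    exact List.getElem_mem _

theorem index?_dedup (s : List Char) (x : Char) (j : Nat)
    (hj : PySem.List.index? s x = some j) :
    PySem.List.index? (PySem.List.dedup s) x = some (PySem.List.dedup (s.take j)).length := by
  obtain ⟨pre, suf, hs, hlenp, hnot⟩ := (PySem.List.index?_eq_some_iff s x j).mp hj
  have htake : s.take j = pre := by rw [hs, ← hlenp, List.take_left]
  rw [htake]
  have hs2 : s = (pre ++ [x]) ++ suf := by rw [hs]; simp
  obtain ⟨u, hu⟩ := dedup_append (pre ++ [x]) suf
  have h1 : PySem.List.dedup (pre ++ [x]) = PySem.List.dedup pre ++ [x] := by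
    rw [dedup_append_singleton, if_neg hnot]
  rw [hs2, hu, h1]
  rw [PySem.List.index?_append_of_mem u (by simp)]
  have hnotd : x ∉ PySem.List.dedup pre := fun hc => hnot ((PySem.List.mem_dedup pre x).mp hc)
  exact PySem.List.index?_append_singleton_self _ _ hnotd

theorem get?_associa (sc sp : List Char) (hnd : sc.Nodup) (hlen : sc.length = sp.length)
    (x : Char) :
    (associa sc sp).get? x = (PySem.List.index? sc x).bind fun k => sp[k]? := by
  have hle : sc.length ≤ sp.length := hlen.le
  have hitems : (associa sc sp).items = sc.zip sp := by
    unfold associa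
    rw [PySem.Dict.items_foldl_insert_fresh (sc.zip sp) Prod.fst Prod.snd PySem.Dict.empty
      (fun a _ => by simp) (by rw [List.map_fst_zip hle]; exact hnd)]
    simp [PySem.Dict.empty]
  have hkeys : (associa sc sp).keys = sc := by
    show (associa sc sp).items.map Prod.fst = sc
    rw [hitems]; exact List.map_fst_zip hle
  cases hidx : PySem.List.index? sc x with
  | none =>
    have hx : x ∉ sc := (PySem.List.index?_eq_none_iff sc x).mp hidx
    rw [(PySem.Dict.get?_eq_none_iff_not_mem_keys _ x).mpr (by rw [hkeys]; exact hx)]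
    rfl
  | some k =>
    obtain ⟨hk, hgx, _⟩ := PySem.List.getElem_of_index?_eq_some hidx
    have hk2 : k < sp.length := hlen ▸ hk
    have hkz : k < (sc.zip sp).length := by rw [List.length_zip]; omega
    have hmem : (x, sp[k]) ∈ (associa sc sp).items := by
      rw [hitems, ← hgx]
      have hz : (sc.zip sp)[k]'hkz = (sc[k], sp[k]) := List.getElem_zip
      rw [← hz]
      exact List.getElem_mem hkz
    rw [PySem.Dict.get?_of_mem_items _ hmem (by rw [hkeys]; exact hnd)]
    rw [Option.bind, List.getElem?_eq_getElem hk2]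

theorem rank_spec (cs ps : List Char)
    (hg : (PySem.List.dedup cs).length = (PySem.List.dedup ps).length)
    (a : Char) (ha : a ∈ cs) :
    ∃ (k : Nat) (hk : k < (PySem.List.dedup ps).length),
      PySem.List.index? (PySem.List.dedup cs) a = some k ∧
        rankMap (PySem.List.dedup cs) (PySem.List.dedup ps) a = (PySem.List.dedup ps)[k] := by
  have hmem : a ∈ PySem.List.dedup cs := (PySem.List.mem_dedup cs a).mpr ha
  obtain ⟨k, hk⟩ := Option.isSome_iff_exists.mp
    ((PySem.List.index?_isSome_iff (PySem.List.dedup cs) a).mpr hmem)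
  obtain ⟨hklt, _, _⟩ := PySem.List.getElem_of_index?_eq_some hk
  have hk2 : k < (PySem.List.dedup ps).length := hg ▸ hklt
  refine ⟨k, hk2, hk, ?_⟩
  rw [rankMap, hk, Option.bind, List.getElem?_eq_getElem hk2]
  rfl

theorem rankMap_inj (cs ps : List Char)
    (hg : (PySem.List.dedup cs).length = (PySem.List.dedup ps).length)
    (a b : Char) (ha : a ∈ cs) (hb : b ∈ cs)
    (h : rankMap (PySem.List.dedup cs) (PySem.List.dedup ps) a =
      rankMap (PySem.List.dedup cs) (PySem.List.dedup ps) b) : a = b := by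
  obtain ⟨k1, hk1, hi1, hr1⟩ := rank_spec cs ps hg a ha
  obtain ⟨k2, hk2, hi2, hr2⟩ := rank_spec cs ps hg b hb
  have hkk : k1 = k2 := by
    have : (PySem.List.dedup ps)[k1] = (PySem.List.dedup ps)[k2] := by
      rw [← hr1, ← hr2, h]
    exact (List.Nodup.getElem_inj_iff (PySem.List.nodup_dedup ps)).mp this
  subst hkk
  obtain ⟨_, hga, _⟩ := PySem.List.getElem_of_index?_eq_some hi1
  obtain ⟨_, hgb, _⟩ := PySem.List.getElem_of_index?_eq_some hi2
  rw [← hga, ← hgb]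

theorem flatMap_eq_map_of (l : List Char) (f : Char → List Char) (g : Char → Char)
    (h : ∀ ch ∈ l, f ch = [g ch]) : l.flatMap f = l.map g := by
  induction l with
  | nil => rfl
  | cons x l ih =>
    rw [List.flatMap_cons, List.map_cons, h x List.mem_cons_self,
      ih (fun ch hch => h ch (List.mem_cons_of_mem x hch))]
    rfl

theorem assoc_get_mem (cs ps : List Char)
    (hg : (PySem.List.dedup cs).length = (PySem.List.dedup ps).length)
    (ch : Char) (hch : ch ∈ cs) :
    (associa (PySem.List.dedup cs) (PySem.List.dedup ps)).get? ch =
      some (rankMap (PySem.List.dedup cs) (PySem.List.dedup ps) ch) := by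
  obtain ⟨k, hk, hi, hr⟩ := rank_spec cs ps hg ch hch
  rw [get?_associa _ _ (PySem.List.nodup_dedup cs) hg, hi, Option.bind,
    List.getElem?_eq_getElem hk, hr]

theorem mtch_eq_map (cs ps : List Char)
    (hg : (PySem.List.dedup cs).length = (PySem.List.dedup ps).length) :
    cs.foldl (fun acc ch => acc ++
        (match (associa (PySem.List.dedup cs) (PySem.List.dedup ps)).get? ch with
          | some v => [v] | none => [])) [] =
      cs.map (rankMap (PySem.List.dedup cs) (PySem.List.dedup ps)) := by
  rw [PySem.List.foldl_append_eq_flatMap]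
  rw [List.nil_append]
  exact flatMap_eq_map_of cs _ _ (fun ch hch => by rw [assoc_get_mem cs ps hg ch hch])

theorem dedup_take_len (cs ps : List Char) (hlen : cs.length = ps.length)
    (F : ∀ (i : Nat) (x y : Char), cs[i]? = some x → ps[i]? = some y →
      PySem.List.index? cs x = PySem.List.index? ps y) :
    ∀ m, m ≤ cs.length →
      (PySem.List.dedup (cs.take m)).length = (PySem.List.dedup (ps.take m)).length := by
  intro m
  induction m with
  | zero => intro _; rfl
  | succ m ih =>
    intro hm
    have hm' : m ≤ cs.length := by omega
    have hmc : m < cs.length := by omega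
    have hmp : m < ps.length := by omega
    rw [List.take_add_one, List.take_add_one, List.getElem?_eq_getElem hmc,
      List.getElem?_eq_getElem hmp]
    simp only [Option.toList_some]
    rw [dedup_append_singleton, dedup_append_singleton]
    have hmem : cs[m] ∈ cs.take m ↔ ps[m] ∈ ps.take m := by
      rw [mem_take_iff_index?_lt, mem_take_iff_index?_lt,
        F m cs[m] ps[m] (List.getElem?_eq_getElem hmc) (List.getElem?_eq_getElem hmp)]
    by_cases h1 : cs[m] ∈ cs.take m
    · rw [if_pos h1, if_pos (hmem.mp h1)]
      exact ih hm'
    · rw [if_neg h1, if_neg (fun hc => h1 (hmem.mpr hc))]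
      rw [List.length_append, List.length_append, ih hm']
      rfl

theorem main_iff (cs ps : List Char) :
    (¬ (PySem.List.dedup ps).length ≠ (PySem.List.dedup cs).length ∧
       cs.map (rankMap (PySem.List.dedup cs) (PySem.List.dedup ps)) = ps) ↔
      (cs.length = ps.length ∧ ∀ (i : Nat) (x y : Char), cs[i]? = some x → ps[i]? = some y →
        PySem.List.index? cs x = PySem.List.index? ps y) := by
  constructor
  · rintro ⟨hg', hmap⟩
    have hg : (PySem.List.dedup cs).length = (PySem.List.dedup ps).length :=
      (not_ne_iff.mp hg').symm
    have hlen : cs.length = ps.length := by rw [← hmap]; simp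
    have hpt : ∀ t (ht : t < cs.length),
        rankMap (PySem.List.dedup cs) (PySem.List.dedup ps) (cs[t]'ht) =
          ps[t]'(hlen ▸ ht) := by
      intro t ht
      have h := congrArg (fun l => l[t]?) hmap
      simp only [List.getElem?_map, List.getElem?_eq_getElem ht,
        List.getElem?_eq_getElem (show t < ps.length by omega), Option.map_some] at h
      exact Option.some.inj h
    refine ⟨hlen, ?_⟩
    intro i x y hx hy
    obtain ⟨hic, hxe⟩ := List.getElem?_eq_some_iff.mp hx
    obtain ⟨hip, hye⟩ := List.getElem?_eq_some_iff.mp hy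
    have hxmem : x ∈ cs := hxe ▸ List.getElem_mem hic
    obtain ⟨j, hj⟩ := Option.isSome_iff_exists.mp
      ((PySem.List.index?_isSome_iff cs x).mpr hxmem)
    obtain ⟨hjlt, hgj, hjmin⟩ := PySem.List.getElem_of_index?_eq_some hj
    rw [hj]
    symm
    rw [index?_eq_some_iff_getElem]
    refine ⟨by omega, ?_, ?_⟩
    · have h1 := hpt j hjlt
      have h2 := hpt i hic
      rw [hgj] at h1
      rw [hxe] at h2
      rw [← h1, h2, hye]
    · intro j' hj' he
      obtain ⟨hj'p, hy'⟩ := List.getElem?_eq_some_iff.mp he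
      have hj'c : j' < cs.length := by omega
      have e1 := hpt j' hj'c
      have e2 := hpt i hic
      have hreq : rankMap (PySem.List.dedup cs) (PySem.List.dedup ps) (cs[j']'hj'c) =
          rankMap (PySem.List.dedup cs) (PySem.List.dedup ps) (cs[i]'hic) := by
        rw [e1, e2, hy', hye]
      have := rankMap_inj cs ps hg _ _ (List.getElem_mem hj'c) (List.getElem_mem hic) hreq
      exact hjmin j' hj' (by rw [this, hxe])
  · rintro ⟨hlen, F⟩
    have hpre := dedup_take_len cs ps hlen F
    have hg : (PySem.List.dedup cs).length = (PySem.List.dedup ps).length := by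
      have h := hpre cs.length le_rfl
      rw [List.take_length, hlen, List.take_length] at h
      exact h
    refine ⟨by omega, ?_⟩
    apply List.ext_getElem (by simp [hlen])
    intro i h1 h2
    rw [List.getElem_map]
    have hic : i < cs.length := by simpa using h1
    have hxmem : cs[i]'hic ∈ cs := List.getElem_mem hic
    obtain ⟨j, hj⟩ := Option.isSome_iff_exists.mp
      ((PySem.List.index?_isSome_iff cs (cs[i]'hic)).mpr hxmem)
    have hfij : PySem.List.index? ps (ps[i]'h2) = some j := by
      rw [← F i (cs[i]'hic) (ps[i]'h2) (List.getElem?_eq_getElem hic)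
        (List.getElem?_eq_getElem h2)]
      exact hj
    have hrc := index?_dedup cs _ j hj
    have hrp := index?_dedup ps _ j hfij
    have hjlt : j < cs.length := (PySem.List.getElem_of_index?_eq_some hj).1
    have hkeq : (PySem.List.dedup (cs.take j)).length =
        (PySem.List.dedup (ps.take j)).length := hpre j (by omega)
    have hklt : (PySem.List.dedup (cs.take j)).length < (PySem.List.dedup ps).length := by
      have := (PySem.List.getElem_of_index?_eq_some hrc).1
      omega
    rw [rankMap, hrc]
    simp only [Option.bind, List.getElem?_eq_getElem hklt, Option.getD_some]
    have hyv := (PySem.List.getElem_of_index?_eq_some hrp).2.1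
    have heq : (PySem.List.dedup ps)[(PySem.List.dedup (cs.take j)).length]'hklt =
        (PySem.List.dedup ps)[(PySem.List.dedup (ps.take j)).length]'(by omega) := by
      congr 1
    rw [heq]
    exact hyv

theorem alt_true_iff (parola codice : String) :
    filtro_alt parola codice = true ↔
      (codice.toList.length = parola.toList.length ∧
        ∀ (i : Nat) (x y : Char), codice.toList[i]? = some x → parola.toList[i]? = some y →
          PySem.List.index? codice.toList x = PySem.List.index? parola.toList y) := by
  set cs := codice.toList with hcs
  set ps := parola.toList with hps
  unfold filtro_alt
  rw [← hcs, ← hps]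
  by_cases h : ps.length ≠ cs.length
  · rw [if_pos h]
    exact iff_of_false (by simp) (fun ⟨h1, _⟩ => h h1.symm)
  · rw [if_neg h]
    rw [List.all_eq_true]
    constructor
    · intro hall
      refine ⟨by omega, ?_⟩
      intro i x y hx hy
      obtain ⟨hic, hxe⟩ := List.getElem?_eq_some_iff.mp hx
      obtain ⟨hip, hye⟩ := List.getElem?_eq_some_iff.mp hy
      have hkz : i < (cs.zip ps).length := by rw [List.length_zip]; omega
      have hz : (cs.zip ps)[i]'hkz = (cs[i], ps[i]) := List.getElem_zip
      have := hall _ (hz ▸ List.getElem_mem hkz)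
      rw [hxe, hye] at this
      exact eq_of_beq this
    · rintro ⟨hlen, F⟩ q hq
      obtain ⟨i, hi, hgi⟩ := List.mem_iff_getElem.mp hq
      have hic : i < cs.length := by rw [List.length_zip] at hi; omega
      have hip : i < ps.length := by rw [List.length_zip] at hi; omega
      have hz : (cs.zip ps)[i]'hi = (cs[i], ps[i]) := List.getElem_zip
      rw [← hgi, hz]
      exact beq_iff_eq.mpr (F i cs[i] ps[i] (List.getElem?_eq_getElem hic)
        (List.getElem?_eq_getElem hip))

theorem a_true_iff (parola codice : String) :
    filtro parola codice = true ↔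
      (¬ (PySem.List.dedup parola.toList).length ≠ (PySem.List.dedup codice.toList).length ∧
        codice.toList.map (rankMap (PySem.List.dedup codice.toList)
          (PySem.List.dedup parola.toList)) = parola.toList) := by
  set cs := codice.toList with hcs
  set ps := parola.toList with hps
  unfold filtro
  rw [← hcs, ← hps, removeDuplicates_eq_dedup, removeDuplicates_eq_dedup]
  by_cases hg : (PySem.List.dedup ps).length ≠ (PySem.List.dedup cs).length
  · rw [if_pos hg]
    exact iff_of_false (by simp) (fun ⟨h1, _⟩ => h1 hg)
  · rw [if_neg hg]
    dsimp only
    have hgeq : (PySem.List.dedup cs).length = (PySem.List.dedup ps).length :=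
      (not_ne_iff.mp hg).symm
    rw [mtch_eq_map cs ps hgeq]
    rw [decide_eq_true_iff]
    exact ⟨fun h => ⟨hg, h⟩, fun ⟨_, h⟩ => h⟩

theorem final (parola codice : String) : filtro parola codice = filtro_alt parola codice := by
  rw [Bool.eq_iff_iff, a_true_iff, alt_true_iff]
  exact main_iff codice.toList parola.toList

-- ===== VERDICT (by name: the statement is the Claim_ definition above) =====
theorem filtro_spec : Claim_equal_filtro := by
  intro parola codice _
  unfold Spec_filtro
  exact final parola codice
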